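-- pv_equiv track=rewrite | github.com/marianapiccolo/Python | Python-Curso-Geofisica/Mastermind.py | ContaRepeticao
-- ===== SOURCE A (Python) =====
-- def tamanho_num(n):
-- 	"""
-- 	Recebe um numero inteiro
-- 	Retorna o tamanho desse numero (isto e, a quantidade de digitos desse numero).
-- 	"""
--
-- 	# caso seja 0
-- 	if n == 0:
-- 		return 1
--
-- 	# caso nao seja 0
-- 	k = 0
-- 	while n // 10**k > 0:
-- 		k += 1
--
-- 	return k
--
-- def obter_digito(j, n):
-- 	"""
-- 	Recebe um numero n e uma posicao j (contada a partir das unidades)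
-- 	Retorna o j-esimo digito de n (contado a partir da unidade, onde j=0 e a unidade)
--
-- 	OBS: espera-se j condizente com n, isto e, j < tamanho_num(n)
-- 	"""
--
-- 	return (n // 10**j) % 10
--
-- def ContaDigito(d, n):
-- 	# obtem o tamanho do numero m (que deve ser, por hipotese igual ao tamanho do numero n). Faz uso de uma funcao auxiliar declarada acima.
-- 	TAMANHO = tamanho_num(n)
--
-- 	# varre o numero e conta as ocorrenias de d
-- 	j = 0
-- 	num_ocorrencias = 0
-- 	while j < TAMANHO:
--
-- 		# verifica se a posicao j do numero n e d
-- 		if obter_digito(j, n) == d: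
-- 			num_ocorrencias += 1
--
-- 		# próxima iterada
-- 		j += 1
--
-- 	return num_ocorrencias
--
-- def ContaRepeticao(m, n):
-- 	# varre as cores
-- 	cor = 1
-- 	soma = 0
-- 	while cor <= 9:
-- 		# ocorrencias da cor em n
-- 		ocorrencias_em_n = ContaDigito(cor, n)
--
-- 		# caso a cor esteja em n
-- 		if ocorrencias_em_n > 0:
-- 			# ocorrencias em m
-- 			ocorrencias_em_m = ContaDigito(cor, m)
--
-- 			# soma o menor numero de ocorrencias
-- 			if ocorrencias_em_n > ocorrencias_em_m:
-- 				soma += ocorrencias_em_m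
-- 			else:
-- 				soma += ocorrencias_em_n
--
-- 		# proxima cor
-- 		cor += 1
--
-- 	return soma
-- ===== SOURCE B (Python) =====
-- def ContaRepeticao(m, n):
--     # Build a digit-frequency table for each number in one pass, then
--     # sum the per-color minima over colors 1-9.
--     def digit_counts(x):
--         counts = [0] * 10
--         if x == 0:
--             counts[0] = 1
--             return counts
--         while x > 0:
--             x, d = divmod(x, 10)
--             counts[d] += 1
--         return counts
--     cm = digit_counts(m)
--     cn = digit_counts(n)
--     return sum(min(cm[d], cn[d]) for d in range(1, 10))
-- ===== Notes on version B (the rewrite author's own statement) =====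
-- stated objective: idiomatic
-- what changed: B builds a 10-entry digit-frequency table for each number in a single divmod pass and sums per-color minima over 1-9, instead of A's nine rescans of both numbers with positional powers of ten.
import Mathlib
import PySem

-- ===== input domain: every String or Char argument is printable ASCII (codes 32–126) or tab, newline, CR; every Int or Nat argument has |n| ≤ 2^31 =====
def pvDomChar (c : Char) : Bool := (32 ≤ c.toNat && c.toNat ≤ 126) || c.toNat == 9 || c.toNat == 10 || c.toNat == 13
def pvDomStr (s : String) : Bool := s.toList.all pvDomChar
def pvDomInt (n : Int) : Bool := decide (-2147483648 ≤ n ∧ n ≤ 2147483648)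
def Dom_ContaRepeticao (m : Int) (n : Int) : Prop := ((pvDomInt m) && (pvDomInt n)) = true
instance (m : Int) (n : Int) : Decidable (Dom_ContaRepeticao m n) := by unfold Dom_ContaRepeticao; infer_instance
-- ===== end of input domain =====

-- B replaces A's nine positional rescans of both numbers by one digit-frequency
-- table per number built in a single pass (idiomatic frequency-count formulation).


-- ===== PORT A =====
-- while n // 10**k > 0: k += 1
def tamanhoLoop (n : Int) (k : Nat) : Nat :=
  if h : 0 < PySem.Int.floordiv n (10 ^ k) then tamanhoLoop n (k + 1) else k
termination_by n.toNat + 1 - 10 ^ k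
decreasing_by
  have hle : (1:Int) * 10 ^ k ≤ n :=
    (PySem.Int.le_floordiv_iff_mul_le (by positivity)).mp (by omega)
  have h1 : ((10:Int) ^ k) = ((10 ^ k : Nat) : Int) := by push_cast; ring
  have h4 : 0 < (10:Nat) ^ k := by positivity
  omega

def tamanho_num (n : Int) : Nat :=
  if n = 0 then 1 else tamanhoLoop n 0

def obter_digito (j : Nat) (n : Int) : Int :=
  PySem.Int.mod (PySem.Int.floordiv n (10 ^ j)) 10

-- while j < TAMANHO: count occurrences of d
def contaDigitoLoop (d n : Int) (T j : Nat) (acc : Int) : Int :=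
  if j < T then
    contaDigitoLoop d n T (j + 1) (if obter_digito j n = d then acc + 1 else acc)
  else acc
termination_by T - j

def ContaDigito (d n : Int) : Int :=
  contaDigitoLoop d n (tamanho_num n) 0 0

-- while cor <= 9
def contaRepLoop (m n cor soma : Int) : Int :=
  if h : cor ≤ 9 then
    let ocorrencias_em_n := ContaDigito cor n
    let soma' :=
      if 0 < ocorrencias_em_n then
        let ocorrencias_em_m := ContaDigito cor m
        if ocorrencias_em_m < ocorrencias_em_n then soma + ocorrencias_em_m
        else soma + ocorrencias_em_n
      else soma
    contaRepLoop m n (cor + 1) soma'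
  else soma
termination_by (10 - cor).toNat
decreasing_by omega

def ContaRepeticao (m : Int) (n : Int) : Int :=
  contaRepLoop m n 1 0

-- ===== PORT B =====
-- while x > 0: x, d = divmod(x, 10); counts[d] += 1
-- (counts[d] += 1 ported with List.set/List.getD: d = x % 10 is always in range 0..9,
--  so getD/set are exact for Python's in-range indexing)
def digitLoop (x : Int) (counts : List Int) : List Int :=
  if h : 0 < x then
    digitLoop (PySem.Int.floordiv x 10)
      (counts.set (PySem.Int.mod x 10).toNat
        (counts.getD (PySem.Int.mod x 10).toNat 0 + 1))
  else counts
termination_by x.toNat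
decreasing_by
  rw [PySem.Int.floordiv_eq_ediv_of_pos (by norm_num)]; omega

def digit_counts (x : Int) : List Int :=
  if x = 0 then (List.replicate 10 (0:Int)).set 0 1
  else digitLoop x (List.replicate 10 0)

def ContaRepeticao_alt (m : Int) (n : Int) : Int :=
  let cm := digit_counts m
  let cn := digit_counts n
  (PySem.List.pyRange 1 10 1).foldl
    (fun acc d => acc + min (cm.getD d.toNat 0) (cn.getD d.toNat 0)) 0

-- ===== PRECONDITION & SPEC =====
def Spec_ContaRepeticao (m : Int) (n : Int) (out : Int) : Prop := out = ContaRepeticao_alt m n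
instance (m : Int) (n : Int) (out : Int) : Decidable (Spec_ContaRepeticao m n out) := by unfold Spec_ContaRepeticao; infer_instance

-- ===== CLAIM (what is proved, stated in full; the proofs are below) =====
def Claim_equal_ContaRepeticao : Prop := ∀ (m : Int) (n : Int), Dom_ContaRepeticao m n → Spec_ContaRepeticao m n (ContaRepeticao m n)

-- ===== LEMMAS AND PROOFS =====

-- reference: number of occurrences of d among the decimal digits of x (0 for x ≤ 0)
def occ (d x : Int) : Int :=
  if h : 0 < x then
    (if PySem.Int.mod x 10 = d then 1 else 0) + occ d (PySem.Int.floordiv x 10)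
  else 0
termination_by x.toNat
decreasing_by
  rw [PySem.Int.floordiv_eq_ediv_of_pos (by norm_num)]; omega

theorem occ_nonneg (d x : Int) : 0 ≤ occ d x := by
  induction x using occ.induct with
  | case1 x h ih => rw [occ, dif_pos h]; split_ifs <;> omega
  | case2 x h => rw [occ, dif_neg h]

-- occ truncated to k digits
def occK (d y : Int) : Nat → Int
  | 0 => 0
  | k + 1 => (if PySem.Int.mod y 10 = d then 1 else 0) + occK d (PySem.Int.floordiv y 10) k

theorem occK_zero (d : Int) (hd : d ≠ 0) : ∀ k, occK d 0 k = 0 := by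
  intro k
  induction k with
  | zero => rfl
  | succ k ih =>
    simp only [occK, PySem.Int.mod, PySem.Int.floordiv] at *
    norm_num [ih]
    omega

theorem occK_eq_occ (d : Int) (hd : d ≠ 0) :
    ∀ (k : Nat) (y : Int), 0 ≤ y → PySem.Int.floordiv y (10 ^ k) = 0 → occK d y k = occ d y := by
  intro k
  induction k with
  | zero =>
    intro y hy h0
    rw [pow_zero, PySem.Int.floordiv_eq_ediv_of_pos (by norm_num)] at h0
    simp only [Int.ediv_one] at h0
    subst h0
    rw [occK, occ]; simp
  | succ k ih =>
    intro y hy h0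
    rcases eq_or_lt_of_le hy with h | h
    · rw [← h, occK_zero d hd, occ]; simp
    · rw [occK, occ, dif_pos h]
      congr 1
      apply ih
      · rw [PySem.Int.floordiv_eq_ediv_of_pos (by norm_num)]
        positivity
      · rw [PySem.Int.floordiv_eq_ediv_of_pos (show (0:Int) < 10 by norm_num),
            PySem.Int.floordiv_eq_ediv_of_pos (show (0:Int) < 10 ^ k by positivity)]
        rw [PySem.Int.floordiv_eq_ediv_of_pos (show (0:Int) < 10 ^ (k+1) by positivity)] at h0
        rw [Int.ediv_ediv_of_nonneg (by norm_num : (0:Int) ≤ 10)]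
        rw [show (10:Int) * 10 ^ k = 10 ^ (k+1) by ring]
        exact h0

theorem contaLoop_eq (d x : Int) :
    ∀ (k : Nat) (j : Nat) (acc : Int),
      contaDigitoLoop d x (j + k) j acc = acc + occK d (PySem.Int.floordiv x (10 ^ j)) k := by
  intro k
  induction k with
  | zero =>
    intro j acc
    rw [contaDigitoLoop, if_neg (by omega)]; simp [occK]
  | succ k ih =>
    intro j acc
    rw [contaDigitoLoop, if_pos (by omega)]
    have hrec : j + (k + 1) = (j + 1) + k := by omega
    rw [hrec, ih (j + 1)]
    have hdiv : PySem.Int.floordiv x (10 ^ (j + 1)) =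
        PySem.Int.floordiv (PySem.Int.floordiv x (10 ^ j)) 10 := by
      rw [PySem.Int.floordiv_eq_ediv_of_pos (show (0:Int) < 10 by norm_num),
          PySem.Int.floordiv_eq_ediv_of_pos (show (0:Int) < 10 ^ j by positivity),
          PySem.Int.floordiv_eq_ediv_of_pos (show (0:Int) < 10 ^ (j+1) by positivity)]
      rw [Int.ediv_ediv_of_nonneg (show (0:Int) ≤ 10 ^ j by positivity), pow_succ]
    rw [occK, ← hdiv]
    unfold obter_digito
    split_ifs <;> omega

theorem tamanhoLoop_spec (n : Int) (k : Nat) :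
    ¬ (0 < PySem.Int.floordiv n (10 ^ tamanhoLoop n k)) := by
  induction k using tamanhoLoop.induct n with
  | case1 k h ih => rw [tamanhoLoop, dif_pos h]; exact ih
  | case2 k h => rw [tamanhoLoop, dif_neg h]; exact h

theorem ContaDigito_eq_occ (d x : Int) (hd : 1 ≤ d) : ContaDigito d x = occ d x := by
  have hd0 : d ≠ 0 := by omega
  unfold ContaDigito
  have hfloor1 : ∀ y : Int, PySem.Int.floordiv y (10 ^ (0:Nat)) = y := by
    intro y
    rw [pow_zero, PySem.Int.floordiv_eq_ediv_of_pos (by norm_num)]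
    simp
  rcases lt_trichotomy x 0 with hx | hx | hx
  · -- negative x: tamanho_num x = 0, the counting loop does not run, occ = 0
    have hT : tamanho_num x = 0 := by
      unfold tamanho_num
      rw [if_neg (by omega), tamanhoLoop, dif_neg (by rw [hfloor1]; omega)]
    rw [hT, contaDigitoLoop, if_neg (by omega), occ, dif_neg (by omega)]
  · subst hx
    have hT : tamanho_num 0 = 1 := by unfold tamanho_num; simp
    rw [hT, show (1:Nat) = 0 + 1 by rfl, contaLoop_eq d 0 1 0 0]
    rw [hfloor1, occ, dif_neg (by omega), occK_zero d hd0]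
    simp
  · -- positive x
    have hT0 : tamanho_num x = tamanhoLoop x 0 := by unfold tamanho_num; rw [if_neg (by omega)]
    rw [hT0, show tamanhoLoop x 0 = 0 + tamanhoLoop x 0 by omega,
        contaLoop_eq d x (tamanhoLoop x 0) 0 0]
    rw [hfloor1]
    have hstop := tamanhoLoop_spec x 0
    have hzero : PySem.Int.floordiv x (10 ^ tamanhoLoop x 0) = 0 := by
      rw [PySem.Int.floordiv_eq_ediv_of_pos (by positivity)] at hstop ⊢
      have : 0 ≤ x / (10 ^ tamanhoLoop x 0 : Int) := Int.ediv_nonneg (by omega) (by positivity)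
      omega
    rw [occK_eq_occ d hd0 _ x (by omega) hzero]
    ring

theorem digitLoop_getD (x : Int) (counts : List Int) :
    counts.length = 10 → ∀ (d : Int), 0 ≤ d → d < 10 →
      (digitLoop x counts).getD d.toNat 0 = counts.getD d.toNat 0 + occ d x := by
  induction x, counts using digitLoop.induct with
  | case1 x counts h ih =>
    intro hlen d hd0 hd10
    have h10 : (0:Int) < 10 := by norm_num
    have hmod0 : 0 ≤ PySem.Int.mod x 10 := by
      rw [PySem.Int.mod_eq_emod_of_pos h10]; exact Int.emod_nonneg x (by norm_num)
    have hmod10 : PySem.Int.mod x 10 < 10 := by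
      rw [PySem.Int.mod_eq_emod_of_pos h10]; exact Int.emod_lt_of_pos x h10
    rw [digitLoop, dif_pos h, occ, dif_pos h]
    rw [ih (by simpa using hlen) d hd0 hd10]
    set r := (PySem.Int.mod x 10).toNat with hr
    have hrlen : r < counts.length := by omega
    by_cases hcase : d.toNat = r
    · have he : PySem.Int.mod x 10 = d := by omega
      rw [if_pos he, hcase]
      have hs : (counts.set r (counts.getD r 0 + 1)).getD r 0 = counts.getD r 0 + 1 := by
        simp [List.getD, List.getElem?_set_self hrlen]
      rw [hs]; ring
    · have hne : ¬ (PySem.Int.mod x 10 = d) := by omega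
      rw [if_neg hne]
      have hs : (counts.set r (counts.getD r 0 + 1)).getD d.toNat 0 = counts.getD d.toNat 0 := by
        simp [List.getD, List.getElem?_set_ne (by omega : r ≠ d.toNat)]
      rw [hs]; ring
  | case2 x counts h =>
    intro hlen d hd0 hd10
    rw [digitLoop, dif_neg h, occ, dif_neg h]; ring

theorem digit_counts_getD (x d : Int) (hd1 : 1 ≤ d) (hd10 : d < 10) :
    (digit_counts x).getD d.toNat 0 = occ d x := by
  unfold digit_counts
  by_cases hx : x = 0
  · rw [if_pos hx, hx, occ, dif_neg (by omega)]
    interval_cases d <;> rfl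
  · rw [if_neg hx, digitLoop_getD x _ (by simp) d (by omega) hd10]
    have hz : (List.replicate 10 (0:Int)).getD d.toNat 0 = 0 := by
      interval_cases d <;> rfl
    rw [hz]; ring

theorem aTerm_eq (c m n : Int) (hc1 : 1 ≤ c) (hc10 : c < 10) (soma : Int) :
    (if 0 < ContaDigito c n then
       (if ContaDigito c m < ContaDigito c n then soma + ContaDigito c m
        else soma + ContaDigito c n)
     else soma)
      = soma + min ((digit_counts m).getD c.toNat 0) ((digit_counts n).getD c.toNat 0) := by
  rw [digit_counts_getD m c hc1 hc10, digit_counts_getD n c hc1 hc10,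
      ContaDigito_eq_occ c m hc1, ContaDigito_eq_occ c n hc1]
  have ha := occ_nonneg c m
  have hb := occ_nonneg c n
  split_ifs <;> omega

theorem contaRepLoop_step (m n cor soma : Int) (h1 : 1 ≤ cor) (h9 : cor ≤ 9) :
    contaRepLoop m n cor soma =
      contaRepLoop m n (cor + 1)
        (soma + min ((digit_counts m).getD cor.toNat 0) ((digit_counts n).getD cor.toNat 0)) := by
  rw [contaRepLoop]
  simp only [dif_pos h9]
  rw [aTerm_eq cor m n h1 (by omega) soma]

theorem contaRepLoop_stop (m n soma : Int) : contaRepLoop m n 10 soma = soma := by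
  rw [contaRepLoop, dif_neg (by norm_num)]

-- ===== VERDICT (by name: the statement is the Claim_ definition above) =====
theorem ContaRepeticao_spec : Claim_equal_ContaRepeticao := by
  intro m n _
  unfold Spec_ContaRepeticao ContaRepeticao ContaRepeticao_alt
  have hrange : PySem.List.pyRange 1 10 1 = [1,2,3,4,5,6,7,8,9] := by decide
  rw [hrange]
  simp only [List.foldl]
  rw [contaRepLoop_step m n 1 _ (by norm_num) (by norm_num)]
  rw [show (1:Int) + 1 = 2 by norm_num]
  rw [contaRepLoop_step m n 2 _ (by norm_num) (by norm_num)]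
  rw [show (2:Int) + 1 = 3 by norm_num]
  rw [contaRepLoop_step m n 3 _ (by norm_num) (by norm_num)]
  rw [show (3:Int) + 1 = 4 by norm_num]
  rw [contaRepLoop_step m n 4 _ (by norm_num) (by norm_num)]
  rw [show (4:Int) + 1 = 5 by norm_num]
  rw [contaRepLoop_step m n 5 _ (by norm_num) (by norm_num)]
  rw [show (5:Int) + 1 = 6 by norm_num]
  rw [contaRepLoop_step m n 6 _ (by norm_num) (by norm_num)]
  rw [show (6:Int) + 1 = 7 by norm_num]
  rw [contaRepLoop_step m n 7 _ (by norm_num) (by norm_num)]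
  rw [show (7:Int) + 1 = 8 by norm_num]
  rw [contaRepLoop_step m n 8 _ (by norm_num) (by norm_num)]
  rw [show (8:Int) + 1 = 9 by norm_num]
  rw [contaRepLoop_step m n 9 _ (by norm_num) (by norm_num)]
  rw [show (9:Int) + 1 = 10 by norm_num]
  rw [contaRepLoop_stop]
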